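-- pv_equiv track=rewrite | github.com/Anujjain2579/Market-Context-AI | api_service.py | _quarters_desc
-- ===== SOURCE A (Python) =====
-- def _quarters_desc(start_q="Q2 2025", end_q="Q1 2023"):
--     def parse(qs):
--         q, y = qs.split()
--         return int(y), int(q[1])
--     def step_back(y, q):
--         if q > 1: return y, q-1
--         return y-1, 4
--     y, q = parse(start_q)
--     ye, qe = parse(end_q)
--     out = []
--     while (y > ye) or (y == ye and q >= qe):
--         out.append(f"Q{q} {y}")
--         y, q = step_back(y, q)
--     return out
-- ===== SOURCE B (Python) =====
-- def _quarters_desc(start_q="Q2 2025", end_q="Q1 2023"):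
--     def parse(qs):
--         q, y = qs.split()
--         return int(y), int(q[1])
--     ys, qs = parse(start_q)
--     ye, qe = parse(end_q)
--     s = 4 * ys + qs - 1
--     e = 4 * ye + qe - 1
--     return [f"Q{n % 4 + 1} {n // 4}" for n in range(s, e - 1, -1)]
-- ===== Notes on version B (the rewrite author's own statement) =====
-- stated objective: simpler
-- what changed: Replaces A's while loop and its step_back conditional by quarter-index arithmetic: each quarter maps to the integer n = 4*year + quarter - 1 and the result is a single comprehension over a descending range, decoding each index back into its label via n mod 4 and n floor-div 4.
import Mathlib
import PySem

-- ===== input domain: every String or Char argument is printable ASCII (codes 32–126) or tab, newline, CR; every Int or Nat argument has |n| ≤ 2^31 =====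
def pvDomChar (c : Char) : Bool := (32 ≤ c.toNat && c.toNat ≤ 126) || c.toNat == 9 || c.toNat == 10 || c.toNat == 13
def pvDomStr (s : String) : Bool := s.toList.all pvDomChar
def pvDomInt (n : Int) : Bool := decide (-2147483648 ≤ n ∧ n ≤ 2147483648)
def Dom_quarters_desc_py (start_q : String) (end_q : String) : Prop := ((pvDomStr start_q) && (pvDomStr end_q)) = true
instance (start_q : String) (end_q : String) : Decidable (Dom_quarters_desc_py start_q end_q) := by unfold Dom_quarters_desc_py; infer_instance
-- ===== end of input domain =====

-- B replaces A's step-back while loop by quarter-index arithmetic: a quarter is the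
-- integer n = 4*year + (quarter-1), and the answer is range(s, e-1, -1) decoded.
-- Equivalence is proved on the return value only (neither version mutates arguments).

-- ===== PORT A =====
-- parse(qs): q, y = qs.split(); return int(y), int(q[1])   (none where Python raises)
def pvParseQ? (qs : String) : Option (Int × Int) :=
  match PySem.Str.split₀ qs with
  | [q, y] =>
    match PySem.Int.ofStr? y with
    | some yi =>
      match PySem.Str.pyGet? q 1 with
      | some c =>
        match PySem.Int.ofChars? [c] with
        | some qi => some (yi, qi)
        | none => none
      | none => none
    | none => none
  | _ => none

-- f"Q{q} {y}"
def pvFmt (q y : Int) : String := "Q" ++ PySem.Int.toStr q ++ " " ++ PySem.Int.toStr y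

-- the while loop of A, with step_back inlined exactly as written; the Nat fuel is only
-- a totality guard (quarters_desc_py passes provably sufficient fuel, see pvLoopA_eq)
def pvLoopA : Nat → Int → Int → Int → Int → List String
  | 0, _, _, _, _ => []
  | fuel + 1, ye, qe, y, q =>
    if y > ye ∨ (y = ye ∧ q ≥ qe) then
      pvFmt q y :: (if q > 1 then pvLoopA fuel ye qe y (q - 1) else pvLoopA fuel ye qe (y - 1) 4)
    else []

def quarters_desc_py (start_q : String) (end_q : String) : List String :=
  match pvParseQ? start_q, pvParseQ? end_q with
  | some (y, q), some (ye, qe) => pvLoopA (4 * (y - ye) + q + 10).toNat ye qe y q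
  | _, _ => []

-- ===== PORT B =====
def quarters_desc_py_alt (start_q : String) (end_q : String) : List String :=
  match pvParseQ? start_q with
  | none => []
  | some (ys, qs) =>
    match pvParseQ? end_q with
    | none => []
    | some (ye, qe) =>
      (PySem.List.pyRange (4 * ys + qs - 1) (4 * ye + qe - 1 - 1) (-1)).map
        (fun n => "Q" ++ PySem.Int.toStr (PySem.Int.mod n 4 + 1) ++ " " ++ PySem.Int.toStr (PySem.Int.floordiv n 4))

-- ===== PRECONDITION & SPEC =====
-- Pre_ excludes inputs where A raises (a string that is not two whitespace-separated
-- words with an int year and a digit at position 1), and restricts the quarter digit of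
-- both arguments to the natural domain 1..4: on labels like "Q7 2024" or "Q0 2024"
-- (quarter digit 0 or 5..9) A still returns, but its stepping through non-existent
-- quarters is an accident of the implementation, not quarter arithmetic.
def pvQOK (o : Option (Int × Int)) : Bool :=
  match o with
  | some (_, q) => 1 ≤ q && q ≤ 4
  | none => false

def Pre_quarters_desc_py (start_q : String) (end_q : String) : Prop :=
  pvQOK (pvParseQ? start_q) = true ∧ pvQOK (pvParseQ? end_q) = true
instance (start_q : String) (end_q : String) : Decidable (Pre_quarters_desc_py start_q end_q) := by unfold Pre_quarters_desc_py; infer_instance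

def pvWitness_quarters_desc_py : String × String := ("Q1 1", "Q1 1")

def Spec_quarters_desc_py (start_q : String) (end_q : String) (out : List String) : Prop := out = quarters_desc_py_alt start_q end_q
instance (start_q : String) (end_q : String) (out : List String) : Decidable (Spec_quarters_desc_py start_q end_q out) := by unfold Spec_quarters_desc_py; infer_instance

-- ===== CLAIM (what is proved, stated in full; the proofs are below) =====
def Claim_equal_quarters_desc_py : Prop := ∀ (start_q : String) (end_q : String), Dom_quarters_desc_py start_q end_q → Pre_quarters_desc_py start_q end_q → Spec_quarters_desc_py start_q end_q (quarters_desc_py start_q end_q)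

-- ===== LEMMAS AND PROOFS =====

-- decoding the index 4*y+q-1 recovers (q, y) when 1 ≤ q ≤ 4
lemma pvDecode_mod (y q : Int) (h1 : 1 ≤ q) (h2 : q ≤ 4) :
    PySem.Int.mod (4 * y + q - 1) 4 = q - 1 := by
  rw [PySem.Int.mod_eq_emod_of_pos (by norm_num)]; omega

lemma pvDecode_div (y q : Int) (h1 : 1 ≤ q) (h2 : q ≤ 4) :
    PySem.Int.floordiv (4 * y + q - 1) 4 = y := by
  rw [PySem.Int.floordiv_eq_ediv_of_pos (by norm_num)]; omega

-- the loop of A equals the decoded countdown range, by induction on the fuel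
lemma pvLoopA_eq (fuel : Nat) : ∀ (ye qe y q : Int), 1 ≤ qe → qe ≤ 4 → 1 ≤ q → q ≤ 4 →
    (4 * y + q + 1 - (4 * ye + qe)).toNat ≤ fuel →
    pvLoopA fuel ye qe y q = (PySem.List.pyRange (4 * y + q - 1) (4 * ye + qe - 1 - 1) (-1)).map
      (fun n => "Q" ++ PySem.Int.toStr (PySem.Int.mod n 4 + 1) ++ " " ++ PySem.Int.toStr (PySem.Int.floordiv n 4)) := by
  induction fuel with
  | zero =>
    intro ye qe y q hqe1 hqe4 hq1 hq4 hn
    rw [pvLoopA, PySem.List.pyRange_neg_one_eq_nil (by omega), List.map_nil]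
  | succ m ih =>
    intro ye qe y q hqe1 hqe4 hq1 hq4 hn
    by_cases hc : y > ye ∨ (y = ye ∧ q ≥ qe)
    · have hge : 4 * ye + qe ≤ 4 * y + q := by omega
      rw [pvLoopA, if_pos hc, PySem.List.pyRange_neg_one_cons (by omega), List.map_cons]
      congr 1
      · simp only [pvDecode_mod y q hq1 hq4, pvDecode_div y q hq1 hq4, pvFmt,
          show q - 1 + 1 = q from by omega]
      · by_cases hq : q > 1
        · have hm : (4 * y + (q - 1) + 1 - (4 * ye + qe)).toNat ≤ m := by omega
          rw [if_pos hq, ih ye qe y (q - 1) hqe1 hqe4 (by omega) (by omega) hm,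
            show 4 * y + (q - 1) - 1 = 4 * y + q - 1 - 1 from by ring]
        · have hm : (4 * (y - 1) + 4 + 1 - (4 * ye + qe)).toNat ≤ m := by omega
          rw [if_neg hq, ih ye qe (y - 1) 4 hqe1 hqe4 (by norm_num) (by norm_num) hm,
            show 4 * (y - 1) + 4 - 1 = 4 * y + q - 1 - 1 from by omega]
    · rw [pvLoopA, if_neg hc, PySem.List.pyRange_neg_one_eq_nil (by omega), List.map_nil]

-- ===== VERDICT (by name: the statement is the Claim_ definition above) =====
theorem quarters_desc_py_spec : Claim_equal_quarters_desc_py := by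
  intro s e _ hpre
  obtain ⟨h1, h2⟩ := hpre
  unfold Spec_quarters_desc_py quarters_desc_py quarters_desc_py_alt
  rcases hs : pvParseQ? s with _ | ⟨y, q⟩
  · rw [hs] at h1
  rcases he : pvParseQ? e with _ | ⟨ye, qe⟩
  · rw [he] at h2
  rw [hs] at h1
  rw [he] at h2
  simp only [pvQOK, Bool.and_eq_true, decide_eq_true_eq] at h1 h2
  exact pvLoopA_eq (4 * (y - ye) + q + 10).toNat ye qe y q h2.1 h2.2 h1.1 h1.2 (by omega)
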